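-- pv_equiv track=rewrite | github.com/adrianyaniri/estructuraDatos | recursividad.py | seguidores
-- ===== SOURCE A (Python) =====
-- def seguidores(posteos = None):
--     total = None
--     if posteos == 1:
--         total = 1000
--     elif posteos <= 20:
--         total = seguidores(posteos-1)+ 1000
--     else:
--         total = seguidores(posteos - 1)*2 + 500
--     return total
-- ===== SOURCE B (Python) =====
-- def seguidores(posteos=None):
--     if posteos <= 20:
--         return 1000 * posteos
--     return 20500 * 2 ** (posteos - 20) - 500
-- ===== Notes on version B (the rewrite author's own statement) =====
-- stated objective: faster
-- what changed: replaced the linear recursion by the closed form 1000*n for n<=20 and 20500*2^(n-20)-500 for n>20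
-- outside the precondition, e.g. on seguidores(0): A raises RecursionError, B returns 0; on seguidores(-500): A raises RecursionError, B returns -500000
import Mathlib
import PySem

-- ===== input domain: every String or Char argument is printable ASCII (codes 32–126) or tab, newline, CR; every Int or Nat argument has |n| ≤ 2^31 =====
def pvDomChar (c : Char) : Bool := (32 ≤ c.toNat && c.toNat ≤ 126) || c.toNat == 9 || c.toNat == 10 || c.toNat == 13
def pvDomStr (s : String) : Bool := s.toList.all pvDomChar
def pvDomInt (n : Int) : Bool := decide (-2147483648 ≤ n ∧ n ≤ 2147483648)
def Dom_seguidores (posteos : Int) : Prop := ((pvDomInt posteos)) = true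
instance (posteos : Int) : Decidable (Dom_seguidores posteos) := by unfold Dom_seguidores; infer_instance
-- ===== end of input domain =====

-- B replaces A's linear recursion with the closed form (1000*n for n ≤ 20, else 20500*2^(n-20)-500); objective: faster.

-- ===== PORT A =====
-- fuel makes the recursion total in Lean; posteos.toNat steps suffice on Pre_ (posteos ≥ 1)
def seguidoresFuel : Nat → Int → Int
  | 0, _ => 0
  | f + 1, p =>
    if p = 1 then 1000
    else if p ≤ 20 then seguidoresFuel f (p - 1) + 1000
    else seguidoresFuel f (p - 1) * 2 + 500

def seguidores (posteos : Int) : Int := seguidoresFuel posteos.toNat posteos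

-- ===== PORT B =====
def seguidores_alt (posteos : Int) : Int :=
  if posteos ≤ 20 then 1000 * posteos
  else 20500 * 2 ^ (posteos - 20).toNat - 500

-- ===== PRECONDITION & SPEC =====
-- A recurses without reaching a base case for posteos ≤ 0 (RecursionError), so Pre_ requires posteos ≥ 1.
def Pre_seguidores (posteos : Int) : Prop := 1 ≤ posteos
instance (posteos : Int) : Decidable (Pre_seguidores posteos) := by unfold Pre_seguidores; infer_instance
def pvWitness_seguidores : Int := (5)

def Spec_seguidores (posteos : Int) (out : Int) : Prop := out = seguidores_alt posteos
instance (posteos : Int) (out : Int) : Decidable (Spec_seguidores posteos out) := by unfold Spec_seguidores; infer_instance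

-- ===== CLAIM (what is proved, stated in full; the proofs are below) =====
def Claim_equal_seguidores : Prop := ∀ (posteos : Int), Dom_seguidores posteos → Pre_seguidores posteos → Spec_seguidores posteos (seguidores posteos)

-- ===== LEMMAS AND PROOFS =====

theorem seguidoresFuel_eq_alt (f : Nat) : ∀ (p : Int), 1 ≤ p → p.toNat ≤ f →
    seguidoresFuel f p = seguidores_alt p := by
  induction f with
  | zero => intro p hp hf; omega
  | succ f ih =>
    intro p hp hf
    by_cases h1 : p = 1
    · subst h1; simp [seguidoresFuel, seguidores_alt]
    · by_cases h20 : p ≤ 20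
      · have : seguidoresFuel f (p - 1) = seguidores_alt (p - 1) := ih (p - 1) (by omega) (by omega)
        simp [seguidoresFuel, h1, h20, this, seguidores_alt]
        rw [if_pos (by omega : p ≤ 21)]
        ring
      · have hrec : seguidoresFuel f (p - 1) = seguidores_alt (p - 1) := ih (p - 1) (by omega) (by omega)
        simp [seguidoresFuel, h1, h20, hrec, seguidores_alt]
        by_cases h21 : p = 21
        · subst h21; norm_num
        · rw [if_neg (by omega : ¬ p ≤ 21)]
          have hpow : (p - 20).toNat = (p - 1 - 20).toNat + 1 := by omega
          rw [hpow, pow_succ]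
          ring

-- ===== VERDICT (by name: the statement is the Claim_ definition above) =====
theorem seguidores_spec : Claim_equal_seguidores := by
  intro p _ hp
  exact seguidoresFuel_eq_alt p.toNat p hp (le_refl _)
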